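-- pv_equiv track=rewrite | github.com/kin10101/kin-reference-code-snippets | React-RAG-App/backend/chunker.py | _tail_units
-- ===== SOURCE A (Python) =====
-- from typing import TYPE_CHECKING, Callable, Dict, List, Sequence
--
-- def _tail_units(units: Sequence[str], separator: str, overlap: int) -> List[str]:
--     if overlap <= 0 or not units:
--         return []
--
--     selected: List[str] = []
--     total = 0
--     for unit in reversed(units):
--         if selected:
--             total += len(separator)
--         selected.insert(0, unit)
--         total += len(unit)
--         if total >= overlap:
--             break
--     return selected
-- ===== SOURCE B (Python) =====
-- def _tail_units(units, separator, overlap):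
--     """Cumulative-length table over the reversed units + binary search for the
--     cutoff, then one slice -- no element-by-element front insertion."""
--     if overlap <= 0 or not units:
--         return []
--     n = len(units)
--     sep = len(separator)
--     # cum[i] = (joined length of the last i+1 units) + sep
--     cum = []
--     run = 0
--     for u in reversed(units):
--         run += len(u) + sep
--         cum.append(run)
--     target = overlap + sep
--     # first index with cum[idx] >= target (cum is nondecreasing)
--     lo, hi = 0, n
--     while lo < hi:
--         mid = (lo + hi) // 2
--         if cum[mid] < target:
--             lo = mid + 1
--         else:
--             hi = mid
--     k = lo + 1 if lo < n else n
--     return list(units[n - k:])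
-- ===== Notes on version B (the rewrite author's own statement) =====
-- stated objective: alternative
-- what changed: A accumulates units one by one with selected.insert(0, unit) and a break; B precomputes a cumulative-length table over the reversed units, binary-searches it for the minimal suffix length reaching the overlap, and returns one slice units[n-k:].
import Mathlib
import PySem

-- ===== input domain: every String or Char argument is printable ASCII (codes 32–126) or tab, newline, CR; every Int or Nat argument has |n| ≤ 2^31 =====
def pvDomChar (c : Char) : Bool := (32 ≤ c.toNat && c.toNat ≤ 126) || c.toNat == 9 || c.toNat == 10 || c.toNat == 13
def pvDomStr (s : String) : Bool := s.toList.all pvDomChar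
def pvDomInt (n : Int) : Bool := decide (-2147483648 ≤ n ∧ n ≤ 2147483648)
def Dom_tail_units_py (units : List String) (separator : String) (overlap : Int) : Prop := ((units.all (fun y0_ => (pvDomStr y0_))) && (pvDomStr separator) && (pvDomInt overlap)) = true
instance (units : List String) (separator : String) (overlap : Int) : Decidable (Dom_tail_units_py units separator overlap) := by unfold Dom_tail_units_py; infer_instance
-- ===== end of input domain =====

-- B replaces A's element-by-element front-insertion loop by a cumulative-length
-- table over the reversed units plus a binary search for the cutoff and one slice
-- (objective: alternative decomposition, same asymptotic cost).

-- ===== PORT A =====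
-- the `for unit in reversed(units): … break` loop, state = (selected, total)
def tailGoA (sep overlap : Int) : List String → List String → Int → List String
  | [], sel, _ => sel
  | u :: rest, sel, total =>
    let total1 := if sel.isEmpty then total else total + sep
    let sel1 := u :: sel
    let total2 := total1 + PySem.Str.len u
    if overlap ≤ total2 then sel1 else tailGoA sep overlap rest sel1 total2

def tail_units_py (units : List String) (separator : String) (overlap : Int) : List String :=
  if overlap ≤ 0 ∨ units = [] then []
  else tailGoA (PySem.Str.len separator) overlap units.reverse [] 0

-- ===== PORT B =====
-- the `for u in reversed(units): run += len(u)+sep; cum.append(run)` loop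
def tailCum (sep : Int) : List String → Int → List Int
  | [], _ => []
  | u :: rest, run => (run + PySem.Str.len u + sep) :: tailCum sep rest (run + PySem.Str.len u + sep)

-- the `while lo < hi` binary-search loop of Source B
def tailBsearch (cum : List Int) (target : Int) (lo hi : Nat) : Nat :=
  if _h : lo < hi then
    let mid := (lo + hi) / 2
    if cum.getD mid 0 < target then tailBsearch cum target (mid + 1) hi
    else tailBsearch cum target lo mid
  else lo
termination_by hi - lo
decreasing_by all_goals omega

def tail_units_py_alt (units : List String) (separator : String) (overlap : Int) : List String :=
  if overlap ≤ 0 ∨ units = [] then []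
  else
    let n := units.length
    let sep := PySem.Str.len separator
    let cum := tailCum sep units.reverse 0
    let target := overlap + sep
    let lo := tailBsearch cum target 0 n
    let k := if lo < n then lo + 1 else n
    PySem.List.slice units (some ((n : Int) - (k : Int))) none

-- ===== PRECONDITION & SPEC =====
def Spec_tail_units_py (units : List String) (separator : String) (overlap : Int) (out : List String) : Prop := out = tail_units_py_alt units separator overlap
instance (units : List String) (separator : String) (overlap : Int) (out : List String) : Decidable (Spec_tail_units_py units separator overlap out) := by unfold Spec_tail_units_py; infer_instance

-- ===== CLAIM (what is proved, stated in full; the proofs are below) =====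
def Claim_equal_tail_units_py : Prop := ∀ (units : List String) (separator : String) (overlap : Int), Dom_tail_units_py units separator overlap → Spec_tail_units_py units separator overlap (tail_units_py units separator overlap)

-- ===== LEMMAS AND PROOFS =====

-- abstract description of A's loop: shortest prefix of r whose running total reaches target
def tailTakeUntil (target sep : Int) : List String → Int → List String
  | [], _ => []
  | u :: rest, run =>
    let run' := run + PySem.Str.len u + sep
    if target ≤ run' then [u] else u :: tailTakeUntil target sep rest run'

lemma tailGoA_eq (sep overlap : Int) :
    ∀ (r sel : List String) (total run : Int),
      run = total + (if sel.isEmpty then 0 else sep) →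
      tailGoA sep overlap r sel total
        = (tailTakeUntil (overlap + sep) sep r run).reverse ++ sel := by
  intro r
  induction r with
  | nil => intro sel total run _; simp [tailGoA, tailTakeUntil]
  | cons u rest ih =>
    intro sel total run hrun
    simp only [tailGoA, tailTakeUntil]
    have htot : (if sel.isEmpty then total else total + sep) = run := by
      cases h : sel.isEmpty
      · rw [if_neg (by simp)]
        rw [if_neg (by simp [h])] at hrun
        omega
      · rw [if_pos rfl]
        rw [if_pos h] at hrun
        omega
    rw [htot]
    by_cases hc : overlap ≤ run + PySem.Str.len u
    · rw [if_pos hc, if_pos (show overlap + sep ≤ run + PySem.Str.len u + sep by omega)]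
      simp
    · rw [if_neg hc, if_neg (show ¬ (overlap + sep ≤ run + PySem.Str.len u + sep) by omega)]
      rw [ih (u :: sel) (run + PySem.Str.len u) (run + PySem.Str.len u + sep) (by simp)]
      simp

lemma tailTakeUntil_eq_take (target sep : Int) :
    ∀ (r : List String) (run : Int),
      tailTakeUntil target sep r run
        = r.take (min ((tailCum sep r run).findIdx (fun t => decide (target ≤ t)) + 1) r.length) := by
  intro r
  induction r with
  | nil => intro run; simp [tailTakeUntil, tailCum]
  | cons u rest ih =>
    intro run
    simp only [tailTakeUntil, tailCum, List.findIdx_cons, List.length_cons]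
    cases hc : decide (target ≤ run + PySem.Str.len u + sep) with
    | true =>
      rw [if_pos (of_decide_eq_true hc)]
      simp only [cond_true]
      rw [show min (0 + 1) (rest.length + 1) = 1 by omega]
      simp
    | false =>
      rw [if_neg (of_decide_eq_false hc)]
      simp only [cond_false]
      rw [ih]
      rw [show min ((tailCum sep rest (run + PySem.Str.len u + sep)).findIdx (fun t => decide (target ≤ t)) + 1 + 1) (rest.length + 1)
          = (min ((tailCum sep rest (run + PySem.Str.len u + sep)).findIdx (fun t => decide (target ≤ t)) + 1) rest.length) + 1 by omega]
      rw [List.take_succ_cons]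

lemma tailCum_length (sep : Int) : ∀ (r : List String) (run : Int), (tailCum sep r run).length = r.length := by
  intro r; induction r with
  | nil => intro run; simp [tailCum]
  | cons u rest ih => intro run; simp [tailCum, ih]

lemma tailCum_mono (sep : Int) (hsep : 0 ≤ sep) :
    ∀ (r : List String) (run : Int),
      (tailCum sep r run).Pairwise (· ≤ ·) ∧ (∀ x ∈ tailCum sep r run, run ≤ x) := by
  intro r
  induction r with
  | nil => intro run; simp [tailCum]
  | cons u rest ih =>
    intro run
    have hu : 0 ≤ PySem.Str.len u := by rw [PySem.Str.len_eq]; positivity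
    obtain ⟨hp, hall⟩ := ih (run + PySem.Str.len u + sep)
    refine ⟨List.pairwise_cons.mpr ⟨fun x hx => hall x hx, hp⟩, ?_⟩
    intro x hx
    simp only [tailCum, List.mem_cons] at hx
    rcases hx with rfl | hx
    · omega
    · have := hall x hx; omega

lemma tailCum_getD_mono (sep : Int) (hsep : 0 ≤ sep) (r : List String) (run : Int) :
    ∀ i j : Nat, i ≤ j → j < (tailCum sep r run).length →
      (tailCum sep r run).getD i 0 ≤ (tailCum sep r run).getD j 0 := by
  intro i j hij hj
  rcases Nat.lt_or_ge i j with hlt | hge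
  · have hp := (tailCum_mono sep hsep r run).1
    have hi : i < (tailCum sep r run).length := lt_trans hlt hj
    have := List.pairwise_iff_get.mp hp ⟨i, hi⟩ ⟨j, hj⟩ hlt
    simpa [List.getD_eq_getElem, hi, hj] using this
  · have : i = j := le_antisymm hij hge
    simp [this]

lemma findIdx_char (p : Int → Bool) :
    ∀ (l : List Int) (m : Nat), m ≤ l.length →
      (∀ i, i < m → p (l.getD i 0) = false) →
      (m < l.length → p (l.getD m 0) = true) →
      l.findIdx p = m := by
  intro l
  induction l with
  | nil => intro m hm _ _; simp only [List.length_nil] at hm; simp only [List.findIdx_nil]; omega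
  | cons a l' ih =>
    intro m hm hfalse htrue
    cases m with
    | zero =>
      have : p a = true := by simpa using htrue (by simp)
      simp [List.findIdx_cons, this]
    | succ m' =>
      have ha : p a = false := by simpa using hfalse 0 (Nat.succ_pos m')
      simp only [List.findIdx_cons, ha, cond_false]
      have : l'.findIdx p = m' := by
        apply ih m' (by simpa using hm)
        · intro i hi; simpa using hfalse (i + 1) (by omega)
        · intro h; simpa using htrue (by simpa using h)
      omega

lemma tailBsearch_correct (cum : List Int) (target : Int)
    (mono : ∀ i j : Nat, i ≤ j → j < cum.length → cum.getD i 0 ≤ cum.getD j 0) :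
    ∀ lo hi : Nat, lo ≤ hi → hi ≤ cum.length →
      (∀ i, i < lo → cum.getD i 0 < target) →
      (hi < cum.length → target ≤ cum.getD hi 0) →
      tailBsearch cum target lo hi = cum.findIdx (fun t => decide (target ≤ t)) := by
  intro lo hi
  induction lo, hi using tailBsearch.induct cum target with
  | case1 lo hi h mid hcmp ih =>
    intro _ hhi hlow hhigh
    rw [tailBsearch, dif_pos h, if_pos hcmp]
    apply ih (by omega) hhi
    · intro i hi'
      have : cum.getD i 0 ≤ cum.getD mid 0 := mono i mid (by omega) (by omega)
      omega
    · exact hhigh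
  | case2 lo hi h mid hcmp ih =>
    intro hlo hhi hlow hhigh
    rw [tailBsearch, dif_pos h, if_neg hcmp]
    apply ih (by omega) (by omega) hlow
    intro _; omega
  | case3 lo hi h =>
    intro hlo hhi hlow hhigh
    rw [tailBsearch, dif_neg h]
    have heq : lo = hi := by omega
    subst heq
    refine (findIdx_char _ _ _ hhi ?_ ?_).symm
    · intro i hi'; simp only [decide_eq_false_iff_not, not_le]; exact hlow i hi'
    · intro h'; simp only [decide_eq_true_eq]; exact hhigh h'

lemma drop_eq_reverse_take (l : List String) (k : Nat) (hk : k ≤ l.length) :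
    l.drop (l.length - k) = (l.reverse.take k).reverse := by
  have := List.reverse_drop (l := l) (i := l.length - k)
  have hk' : l.length - (l.length - k) = k := by omega
  rw [hk'] at this
  rw [← this, List.reverse_reverse]

-- ===== VERDICT (by name: the statement is the Claim_ definition above) =====
theorem tail_units_py_spec : Claim_equal_tail_units_py := by
  intro units separator overlap _
  unfold Spec_tail_units_py tail_units_py tail_units_py_alt
  by_cases hg : overlap ≤ 0 ∨ units = []
  · simp [hg]
  · rw [if_neg hg, if_neg hg]
    dsimp only
    set sep := PySem.Str.len separator with hsepdef
    have hsep : 0 ≤ sep := by rw [hsepdef, PySem.Str.len_eq]; positivity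
    set r := units.reverse with hr
    set n := units.length with hn
    set cum := tailCum sep r 0 with hcum
    set target := overlap + sep with htarget
    have hcumlen : cum.length = n := by rw [hcum, tailCum_length]; simp [hr, hn]
    set idx := cum.findIdx (fun t => decide (target ≤ t)) with hidx
    have hidxle : idx ≤ n := hcumlen ▸ List.findIdx_le_length
    -- A's side
    have hA : tailGoA sep overlap r [] 0 = (r.take (min (idx + 1) n)).reverse := by
      rw [tailGoA_eq sep overlap r [] 0 0 (by simp)]
      rw [tailTakeUntil_eq_take]
      have hrl : r.length = n := by simp [hr, hn]
      rw [hrl]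
      simp only [hidx, hcum, htarget, List.append_nil]
    -- B's side
    have hlo : tailBsearch cum target 0 n = idx := by
      rw [tailBsearch_correct cum target (tailCum_getD_mono sep hsep r 0) 0 n
        (Nat.zero_le n) (le_of_eq hcumlen.symm) (by omega) (by omega)]
    rw [hlo]
    set k := if idx < n then idx + 1 else n with hk
    have hkn : k ≤ n := by rw [hk]; split <;> omega
    have hkmin : k = min (idx + 1) n := by rw [hk]; split <;> omega
    have hslice : PySem.List.slice units (some ((n : Int) - (k : Int))) none
        = units.drop (n - k) := by
      rw [PySem.List.slice_from units (by omega)]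
      congr 1
      omega
    rw [hslice, hA, hkmin]
    have hd := drop_eq_reverse_take units (min (idx + 1) n) (by omega)
    rw [← hr, ← hn] at hd
    exact hd.symm
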